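-- pv_equiv track=rewrite | github.com/Vulmatch/Vulmatch | extract_sig/extract_insn_from_bin_lib.py | split_disasm
-- ===== SOURCE A (Python) =====
-- def split_disasm(block_disasm):
--  cut_index=[-1]#Record where shall we cut the string
--  for i in range(0,len(block_disasm)):
--   if block_disasm[i:i+4]=="\n0x4" or block_disasm[i:i+4]=="\n0x5":
--    cut_index.append(i)
--  cut_index.append(len(block_disasm))
--  cutted=[]
--  for i in range(0,len(cut_index)-1):
--   start=cut_index[i]+1
--   end=cut_index[i+1]
--   cutted.append(block_disasm[start:end])
--  return cutted
-- ===== SOURCE B (Python) =====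
-- def split_disasm(block_disasm):
--     # one streaming pass: keep the start of the current piece, cut at each marker
--     cutted = []
--     start = 0
--     for i in range(len(block_disasm)):
--         if block_disasm[i:i+4] == "\n0x4" or block_disasm[i:i+4] == "\n0x5":
--             cutted.append(block_disasm[start:i])
--             start = i + 1
--     cutted.append(block_disasm[start:])
--     return cutted
-- ===== Notes on version B (the rewrite author's own statement) =====
-- stated objective: simpler
-- what changed: Replaced A's two-pass structure (collect all cut indices into a list seeded with -1 and terminated with len, then slice between consecutive indices by list indexing) with a single streaming pass that keeps the running start of the current piece and emits a piece at each marker.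
import Mathlib
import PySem

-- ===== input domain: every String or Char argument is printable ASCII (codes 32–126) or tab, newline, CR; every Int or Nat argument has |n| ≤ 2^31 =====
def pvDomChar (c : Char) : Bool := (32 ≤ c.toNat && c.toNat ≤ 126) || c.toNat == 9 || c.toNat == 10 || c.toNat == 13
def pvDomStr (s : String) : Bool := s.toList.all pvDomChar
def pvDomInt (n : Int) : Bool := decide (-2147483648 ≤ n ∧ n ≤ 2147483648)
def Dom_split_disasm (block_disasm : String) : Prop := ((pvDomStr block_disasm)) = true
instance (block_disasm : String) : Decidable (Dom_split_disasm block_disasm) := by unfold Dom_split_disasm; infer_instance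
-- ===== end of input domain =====

-- B replaces A's two passes (collect cut indices seeded with -1 and terminated with len,
-- then slice between consecutive indices) with one streaming pass keeping the running
-- start of the current piece; same cost, simpler decomposition.

-- the marker test  block_disasm[i:i+4] == "\n0x4" or block_disasm[i:i+4] == "\n0x5"
def pvMark (s : String) (i : Int) : Bool :=
  PySem.Str.slice s (some i) (some (i + 4)) == "\n0x4"
    || PySem.Str.slice s (some i) (some (i + 4)) == "\n0x5"

-- ===== PORT A =====
def split_disasm (block_disasm : String) : List String :=
  let cut_index : List Int :=
    (PySem.List.pyRange 0 (PySem.Str.len block_disasm) 1).foldl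
      (fun ci i => if pvMark block_disasm i then ci ++ [i] else ci) [-1]
  let cut_index := cut_index ++ [PySem.Str.len block_disasm]
  (PySem.List.pyRange 0 (PySem.List.len cut_index - 1) 1).foldl
    (fun cutted i =>
      cutted ++ [PySem.Str.slice block_disasm
        (some (PySem.List.pyGetD cut_index i 0 + 1))
        (some (PySem.List.pyGetD cut_index (i + 1) 0))]) []

-- ===== PORT B =====
def split_disasm_alt (block_disasm : String) : List String :=
  let st :=
    (PySem.List.pyRange 0 (PySem.Str.len block_disasm) 1).foldl
      (fun (p : List String × Int) i =>
        if pvMark block_disasm i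
        then (p.1 ++ [PySem.Str.slice block_disasm (some p.2) (some i)], i + 1)
        else p)
      ([], 0)
  st.1 ++ [PySem.Str.slice block_disasm (some st.2) none]

-- ===== PRECONDITION & SPEC =====
def Spec_split_disasm (block_disasm : String) (out : List String) : Prop := out = split_disasm_alt block_disasm
instance (block_disasm : String) (out : List String) : Decidable (Spec_split_disasm block_disasm out) := by unfold Spec_split_disasm; infer_instance

-- ===== CLAIM (what is proved, stated in full; the proofs are below) =====
def Claim_equal_split_disasm : Prop := ∀ (block_disasm : String), Dom_split_disasm block_disasm → Spec_split_disasm block_disasm (split_disasm block_disasm)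

-- ===== LEMMAS AND PROOFS =====

-- the pieces B produces from start `st` cutting at markers `ms`, and the final start
def pvPieces (s : String) (st : Int) : List Int → List String
  | [] => []
  | m :: rest => PySem.Str.slice s (some st) (some m) :: pvPieces s (m + 1) rest

def pvLast (st : Int) : List Int → Int
  | [] => st
  | m :: rest => pvLast (m + 1) rest

lemma pvB_foldl (s : String) (ms : List Int) (acc : List String) (st : Int) :
    ms.foldl
      (fun (p : List String × Int) i =>
        (p.1 ++ [PySem.Str.slice s (some p.2) (some i)], i + 1)) (acc, st)
    = (acc ++ pvPieces s st ms, pvLast st ms) := by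
  induction ms generalizing acc st with
  | nil => simp [pvPieces, pvLast]
  | cons m rest ih => simp [pvPieces, pvLast, ih]

lemma pvB_filter (s : String) (l : List Int) (p : List String × Int) :
    l.foldl
      (fun (p : List String × Int) i =>
        if pvMark s i
        then (p.1 ++ [PySem.Str.slice s (some p.2) (some i)], i + 1)
        else p) p
    = (l.filter (pvMark s)).foldl
      (fun (p : List String × Int) i =>
        (p.1 ++ [PySem.Str.slice s (some p.2) (some i)], i + 1)) p := by
  induction l generalizing p with
  | nil => simp
  | cons x xs ih =>
    by_cases h : pvMark s x
    · simp [h, ih]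
    · simp [h, ih]

lemma pvLast_nonneg (st : Int) (ms : List Int) (hms : ∀ m ∈ ms, 0 ≤ m) (hst : 0 ≤ st) :
    0 ≤ pvLast st ms := by
  induction ms generalizing st with
  | nil => simpa [pvLast] using hst
  | cons m rest ih =>
    exact ih (m + 1) (fun x hx => hms x (List.mem_cons_of_mem _ hx))
      (by have := hms m (List.mem_cons_self ..); omega)

lemma pvSlice_to_len (s : String) (a : Int) (ha : 0 ≤ a) :
    PySem.Str.slice s (some a) (some (PySem.Str.len s)) = PySem.Str.slice s (some a) none := by
  have h : (PySem.Str.slice s (some a) (some (PySem.Str.len s))).toList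
      = (PySem.Str.slice s (some a) none).toList := by
    rw [PySem.Str.toList_slice, PySem.Str.toList_slice, PySem.Chars.slice_eq_listSlice,
      PySem.Chars.slice_eq_listSlice, PySem.Str.len_eq,
      PySem.List.slice_toNat _ ha (by positivity), PySem.List.slice_from _ ha]
    exact List.take_of_length_le (by simp)
  exact String.toList_inj.mp h

-- A's consecutive-pair map over cuts (prev :: ms ++ [n]) equals B's pieces-plus-tail
lemma pvMapg (s : String) (n : Int) (ms : List Int) (prev : Int) :
    (List.range (ms.length + 1)).map
      (fun (k : Nat) => PySem.Str.slice s
        (some (PySem.List.pyGetD (prev :: (ms ++ [n])) ((k : Int)) 0 + 1))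
        (some (PySem.List.pyGetD (prev :: (ms ++ [n])) (((k : Int)) + 1) 0)))
    = pvPieces s (prev + 1) ms
        ++ [PySem.Str.slice s (some (pvLast (prev + 1) ms)) (some n)] := by
  induction ms generalizing prev with
  | nil =>
    simp [pvPieces, pvLast, List.range_succ, PySem.List.pyGetD]
  | cons m rest ih =>
    rw [show (m :: rest).length + 1 = (rest.length + 1) + 1 by simp, List.range_succ_eq_map]
    rw [List.map_cons, List.map_map]
    have h0 : PySem.Str.slice s
        (some (PySem.List.pyGetD (prev :: ((m :: rest) ++ [n])) (((0 : Nat) : Int)) 0 + 1))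
        (some (PySem.List.pyGetD (prev :: ((m :: rest) ++ [n])) ((((0 : Nat) : Int)) + 1) 0))
        = PySem.Str.slice s (some (prev + 1)) (some m) := by
      simp [pysem]
    have hc : ∀ k ∈ List.range (rest.length + 1),
        ((fun (k : Nat) => PySem.Str.slice s
          (some (PySem.List.pyGetD (prev :: ((m :: rest) ++ [n])) ((k : Int)) 0 + 1))
          (some (PySem.List.pyGetD (prev :: ((m :: rest) ++ [n])) (((k : Int)) + 1) 0)))
          ∘ (fun k => k + 1)) k
        = (fun (k : Nat) => PySem.Str.slice s
          (some (PySem.List.pyGetD (m :: (rest ++ [n])) ((k : Int)) 0 + 1))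
          (some (PySem.List.pyGetD (m :: (rest ++ [n])) (((k : Int)) + 1) 0))) k := by
      intro k _
      have e1 : ((k + 1 : Nat) : Int) = (k : Int) + 1 := by push_cast; ring
      have e2 : (((k + 1) + 1 : Nat) : Int) = ((k + 1 : Nat) : Int) + 1 := by push_cast; ring
      simp only [Function.comp_apply, ← e1, ← e2, PySem.List.pyGetD_natCast, List.getD_cons_succ]
      simp
    rw [List.map_congr_left hc, h0, ih m]
    simp [pvPieces, pvLast]

theorem pv_main (s : String) : split_disasm s = split_disasm_alt s := by
  unfold split_disasm split_disasm_alt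
  simp only []
  rw [PySem.List.foldl_append_if (pvMark s) (fun i => i)
      (PySem.List.pyRange 0 (PySem.Str.len s) 1) [-1]]
  rw [pvB_filter, pvB_foldl]
  set ms := (PySem.List.pyRange 0 (PySem.Str.len s) 1).filter (pvMark s) with hms
  rw [PySem.List.foldl_append_singleton_eq_map]
  have hmem : ∀ m ∈ ms, 0 ≤ m := by
    intro m hm
    have h1 := List.mem_of_mem_filter hm
    have h2 := (PySem.List.mem_pyRange_one (a := 0) (b := PySem.Str.len s) (x := m)).mp
      (by simpa using h1)
    omega
  have hlen : (PySem.List.len (([-1] ++ List.map (fun i => i) ms) ++ [PySem.Str.len s])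
      - 1 : Int) = ((ms.length + 1 : Nat) : Int) := by
    simp [PySem.List.len_eq]
  rw [hlen, PySem.List.pyRange_one, List.map_map]
  have hz : ((ms.length + 1 : Nat) : Int) - 0 = ((ms.length + 1 : Nat) : Int) := by ring
  rw [hz, Int.toNat_natCast]
  have hcuts : ([-1] ++ List.map (fun i => i) ms) ++ [PySem.Str.len s]
      = (-1) :: (ms ++ [PySem.Str.len s]) := by simp
  have hbody : ∀ k ∈ List.range (ms.length + 1),
      ((fun i : Int => PySem.Str.slice s
        (some (PySem.List.pyGetD (([-1] ++ List.map (fun i => i) ms) ++ [PySem.Str.len s]) i 0 + 1))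
        (some (PySem.List.pyGetD (([-1] ++ List.map (fun i => i) ms) ++ [PySem.Str.len s]) (i + 1) 0)))
        ∘ (fun k : Nat => (0 : Int) + (k : Int))) k
      = (fun (k : Nat) => PySem.Str.slice s
        (some (PySem.List.pyGetD ((-1) :: (ms ++ [PySem.Str.len s])) ((k : Int)) 0 + 1))
        (some (PySem.List.pyGetD ((-1) :: (ms ++ [PySem.Str.len s])) (((k : Int)) + 1) 0))) k := by
    intro k _; rw [hcuts]; simp
  rw [List.map_congr_left hbody, pvMapg s (PySem.Str.len s) ms (-1)]
  have hneg : (-1 : Int) + 1 = 0 := by ring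
  rw [hneg, pvSlice_to_len s (pvLast 0 ms) (pvLast_nonneg 0 ms hmem le_rfl)]
  simp

-- ===== VERDICT (by name: the statement is the Claim_ definition above) =====
theorem split_disasm_spec : Claim_equal_split_disasm := by
  intro s _
  unfold Spec_split_disasm
  exact pv_main s
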